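-- pv_equiv track=rewrite | github.com/Andrew-Foote/aoc2019 | 8.py | layers
-- ===== SOURCE A (Python) =====
-- def layers(digits, width, height):
--     column_count = 0
--     row_count = 0
--     layer = []
--
--     for digit in digits:
--         layer.append(digit)
--
--         if column_count == width - 1:
--             column_count = 0
--
--             if row_count == height - 1:
--                 row_count = 0
--                 yield layer
--                 layer = []
--             else:
--                 row_count += 1
--         else:
--             column_count += 1
-- ===== SOURCE B (Python) =====
-- def layers(digits, width, height):
--     if width <= 0 or height <= 0:
--         return
--     data = list(digits)
--     size = width * height
--     for i in range(0, len(data) - size + 1, size):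
--         yield data[i:i + size]
-- ===== Notes on version B (the rewrite author's own statement) =====
-- stated objective: faster
-- what changed: Replaces A's per-element append loop with two nested counters by precomputed slice boundaries: materialize the digits, and emit data[i:i+size] for i stepping by size=width*height (nothing when width or height is non-positive, matching A).
import Mathlib
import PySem

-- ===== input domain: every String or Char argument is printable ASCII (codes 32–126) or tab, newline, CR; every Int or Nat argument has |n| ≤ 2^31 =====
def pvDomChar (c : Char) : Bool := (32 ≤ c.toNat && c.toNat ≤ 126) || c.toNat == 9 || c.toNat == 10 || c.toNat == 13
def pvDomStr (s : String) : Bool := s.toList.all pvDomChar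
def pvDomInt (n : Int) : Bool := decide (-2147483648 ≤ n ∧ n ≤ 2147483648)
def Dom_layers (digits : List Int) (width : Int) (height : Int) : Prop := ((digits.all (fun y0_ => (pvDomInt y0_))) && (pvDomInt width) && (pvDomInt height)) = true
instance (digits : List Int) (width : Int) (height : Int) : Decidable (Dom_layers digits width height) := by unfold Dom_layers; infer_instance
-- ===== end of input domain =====

-- B replaces A's per-element append loop with two simulated counters by precomputed
-- slice boundaries over the materialized list (chunks of size width*height).

-- ===== PORT A =====
-- A is a generator; its port returns the list of yielded layers.
-- Loop state: (column_count, row_count, layer, yielded-so-far).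
def layersLoopA (width height : Int) : List Int → Int → Int → List Int → List (List Int) → List (List Int)
  | [], _, _, _, out => out
  | d :: ds, col, row, layer, out =>
    let layer' := layer ++ [d]
    if col == width - 1 then
      if row == height - 1 then
        layersLoopA width height ds 0 0 [] (out ++ [layer'])
      else
        layersLoopA width height ds 0 (row + 1) layer' out
    else
      layersLoopA width height ds (col + 1) row layer' out

def layers (digits : List Int) (width : Int) (height : Int) : List (List Int) :=
  layersLoopA width height digits 0 0 [] []

-- ===== PORT B =====
def layers_alt (digits : List Int) (width : Int) (height : Int) : List (List Int) :=
  if width ≤ 0 ∨ height ≤ 0 then []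
  else
    let size := width * height
    (PySem.List.pyRange 0 ((digits.length : Int) - size + 1) size).map
      (fun i => PySem.List.slice digits (some i) (some (i + size)))

-- ===== PRECONDITION & SPEC =====
def Spec_layers (digits : List Int) (width : Int) (height : Int) (out : List (List Int)) : Prop := out = layers_alt digits width height
instance (digits : List Int) (width : Int) (height : Int) (out : List (List Int)) : Decidable (Spec_layers digits width height out) := by unfold Spec_layers; infer_instance

-- ===== CLAIM (what is proved, stated in full; the proofs are below) =====
def Claim_equal_layers : Prop := ∀ (digits : List Int) (width : Int) (height : Int), Dom_layers digits width height → Spec_layers digits width height (layers digits width height)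

-- ===== LEMMAS AND PROOFS =====

-- Common middle: complete chunks of size s (helper for the proofs only).
def chunks (s : Nat) (ds : List Int) : List (List Int) :=
  if _h : 0 < s ∧ s ≤ ds.length then ds.take s :: chunks s (ds.drop s) else []
termination_by ds.length
decreasing_by simp [List.length_drop]; omega

-- degenerate case of A: if width ≤ 0 or height ≤ 0, nothing is ever yielded
lemma loopA_degenerate (width height : Int) (hwh : width ≤ 0 ∨ height ≤ 0) :
    ∀ (ds : List Int) (col row : Int) (layer : List Int) (out : List (List Int)),
      0 ≤ col → 0 ≤ row → layersLoopA width height ds col row layer out = out := by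
  intro ds
  induction ds with
  | nil => intro col row layer out _ _; rfl
  | cons d ds ih =>
    intro col row layer out hcol hrow
    by_cases hc : col = width - 1
    · rcases hwh with hw | hh
      · omega
      · have hr : ¬ row = height - 1 := by omega
        simp only [layersLoopA, hc, beq_self_eq_true, if_true, beq_iff_eq, hr, if_false]
        exact ih 0 (row + 1) _ out le_rfl (by omega)
    · simp only [layersLoopA, beq_iff_eq, hc, if_false]
      exact ih (col + 1) row _ out (by omega) hrow

-- consuming one full chunk from an arbitrary in-chunk state
lemma loopA_chunk (width height : Int) (hw : 1 ≤ width) (_hh : 1 ≤ height) :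
    ∀ (ds : List Int) (col row : Int) (layer : List Int) (out : List (List Int)),
      0 ≤ col → col < width → 0 ≤ row → row < height →
      layersLoopA width height ds col row layer out =
        (if ((width - col) + width * (height - 1 - row)).toNat ≤ ds.length then
           layersLoopA width height (ds.drop ((width - col) + width * (height - 1 - row)).toNat) 0 0 []
             (out ++ [layer ++ ds.take ((width - col) + width * (height - 1 - row)).toNat])
         else out) := by
  intro ds
  induction ds with
  | nil =>
    intro col row layer out hc0 hcw hr0 hrh
    have hM : (0:Int) ≤ width * (height - 1 - row) := mul_nonneg (by omega) (by omega)
    simp only [layersLoopA, List.length_nil]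
    rw [if_neg]
    omega
  | cons d ds ih =>
    intro col row layer out hc0 hcw hr0 hrh
    have hM : (0:Int) ≤ width * (height - 1 - row) := mul_nonneg (by omega) (by omega)
    by_cases hc : col = width - 1
    · subst hc
      by_cases hr : row = height - 1
      · -- chunk completes with this digit: the remaining count is 1
        subst hr
        have hR : ((width - (width - 1)) + width * (height - 1 - (height - 1))).toNat = 1 := by
          have h : (width - (width - 1)) + width * (height - 1 - (height - 1)) = 1 := by ring
          rw [h]; rfl
        simp only [layersLoopA, beq_self_eq_true, if_true, hR]
        simp
      · -- row advances; the remaining count drops by 1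
        have hM' : width * (height - 1 - (row + 1)) = width * (height - 1 - row) - width := by ring
        simp only [layersLoopA, beq_self_eq_true, if_true, beq_iff_eq, hr, if_false]
        rw [ih 0 (row + 1) _ out le_rfl (by omega) (by omega) (by omega)]
        rw [hM']
        obtain ⟨k, hk⟩ : ∃ k, ((width - (width - 1)) + width * (height - 1 - row)).toNat = k + 1 :=
          ⟨((width - (width - 1)) + width * (height - 1 - row)).toNat - 1, by omega⟩
        have hR : ((width - 0) + (width * (height - 1 - row) - width)).toNat = k := by omega
        rw [hR, hk]
        simp only [List.drop_succ_cons, List.take_succ_cons, List.length_cons,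
          Nat.add_le_add_iff_right, List.append_assoc, List.cons_append, List.nil_append]
    · -- column advances; the remaining count drops by 1
      simp only [layersLoopA, beq_iff_eq, hc, if_false]
      rw [ih (col + 1) row _ out (by omega) (by omega) hr0 hrh]
      obtain ⟨k, hk⟩ : ∃ k, ((width - col) + width * (height - 1 - row)).toNat = k + 1 :=
        ⟨((width - col) + width * (height - 1 - row)).toNat - 1, by omega⟩
      have hR : ((width - (col + 1)) + width * (height - 1 - row)).toNat = k := by omega
      rw [hR, hk]
      simp only [List.drop_succ_cons, List.take_succ_cons, List.length_cons,
        Nat.add_le_add_iff_right, List.append_assoc, List.cons_append, List.nil_append]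

-- A's loop from a fresh state produces exactly the complete chunks
lemma loopA_chunks (width height : Int) (hw : 1 ≤ width) (hh : 1 ≤ height) :
    ∀ (n : Nat) (ds : List Int), ds.length = n → ∀ (out : List (List Int)),
      layersLoopA width height ds 0 0 [] out = out ++ chunks (width * height).toNat ds := by
  intro n
  induction n using Nat.strong_induction_on with
  | _ n ih =>
    intro ds hn out
    have hs : (1:Int) ≤ width * height := by nlinarith
    have hR : (width - 0) + width * (height - 1 - 0) = width * height := by ring
    rw [loopA_chunk width height hw hh ds 0 0 [] out le_rfl (by omega) le_rfl (by omega), hR]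
    by_cases hle : (width * height).toNat ≤ ds.length
    · rw [if_pos hle]
      rw [ih (ds.drop (width * height).toNat).length (by simp [List.length_drop]; omega) _ rfl]
      conv_rhs => rw [chunks]
      rw [dif_pos ⟨by omega, hle⟩]
      simp
    · rw [if_neg hle]
      conv_rhs => rw [chunks]
      rw [dif_neg (by omega)]
      simp

-- positive-step pyRange: cons form
lemma pyRange_pos_cons (a b s : Int) (hs : 0 < s) (hab : a < b) :
    PySem.List.pyRange a b s = a :: PySem.List.pyRange (a + s) b s := by
  rw [PySem.List.pyRange_of_pos a b hs, PySem.List.pyRange_of_pos (a + s) b hs]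
  have hdiv : (b - a + s - 1) / s = (b - (a + s) + s - 1) / s + 1 := by
    have h : b - a + s - 1 = (b - (a + s) + s - 1) + 1 * s := by ring
    rw [h, Int.add_mul_ediv_right _ _ (by omega)]
  by_cases hab' : a + s < b
  · rw [if_pos hab, if_pos hab', hdiv]
    have h0 : 0 ≤ (b - (a + s) + s - 1) / s := Int.ediv_nonneg (by omega) (by omega)
    have h1 : ((b - (a + s) + s - 1) / s + 1).toNat = ((b - (a + s) + s - 1) / s).toNat + 1 := by
      omega
    rw [h1, List.range_succ_eq_map, List.map_cons]
    congr 1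
    · simp
    · rw [List.map_map]
      apply List.map_congr_left
      intro k _
      simp only [Function.comp_apply]
      push_cast
      ring
  · -- exactly one element remains in the range
    rw [if_pos hab, if_neg hab']
    have h1 : (b - a + s - 1) / s = 1 := by
      have hl : 1 ≤ (b - a + s - 1) / s := by
        rw [Int.le_ediv_iff_mul_le hs]; omega
      have hu : (b - a + s - 1) / s < 2 := by
        rw [Int.ediv_lt_iff_lt_mul hs]; omega
      omega
    rw [h1]
    simp

lemma pyRange_pos_nil (a b s : Int) (hs : 0 < s) (hab : b ≤ a) :
    PySem.List.pyRange a b s = [] := by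
  rw [PySem.List.pyRange_of_pos a b hs, if_neg (by omega)]
  simp

-- shift lemma for positive-step ranges
lemma pyRange_pos_shift (a b s c : Int) (hs : 0 < s) :
    PySem.List.pyRange (a + c) (b + c) s = (PySem.List.pyRange a b s).map (· + c) := by
  rw [PySem.List.pyRange_of_pos _ _ hs, PySem.List.pyRange_of_pos _ _ hs]
  have h1 : b + c - (a + c) = b - a := by ring
  have h2 : a + c < b + c ↔ a < b := by omega
  rw [h1]
  simp only [h2, List.map_map]
  apply List.map_congr_left
  intro k _
  simp only [Function.comp_apply]
  ring

-- B's slicing map equals the complete chunks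
lemma alt_chunks (s : Int) (hs : 0 < s) :
    ∀ (n : Nat) (digits : List Int), digits.length = n →
      (PySem.List.pyRange 0 ((digits.length : Int) - s + 1) s).map
        (fun i => PySem.List.slice digits (some i) (some (i + s))) = chunks s.toNat digits := by
  intro n
  induction n using Nat.strong_induction_on with
  | _ n ih =>
    intro digits hn
    by_cases hle : s.toNat ≤ digits.length
    · have hab : (0:Int) < (digits.length : Int) - s + 1 := by omega
      rw [pyRange_pos_cons 0 _ s hs hab, List.map_cons]
      have hb : (digits.length : Int) - s + 1 = (((digits.drop s.toNat).length : Int) - s + 1) + s := by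
        simp only [List.length_drop]; omega
      rw [hb, pyRange_pos_shift 0 _ s s hs, List.map_map]
      have htail : ((PySem.List.pyRange 0 (((digits.drop s.toNat).length : Int) - s + 1) s).map
          ((fun i => PySem.List.slice digits (some i) (some (i + s))) ∘ (· + s)))
          = (PySem.List.pyRange 0 (((digits.drop s.toNat).length : Int) - s + 1) s).map
            (fun i => PySem.List.slice (digits.drop s.toNat) (some i) (some (i + s))) := by
        apply List.map_congr_left
        intro i hi
        have hi0 : 0 ≤ i := ((PySem.List.mem_pyRange_iff_of_pos hs i).1 hi).1
        simp only [Function.comp_apply]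
        rw [PySem.List.slice_toNat _ (by omega) (by omega),
            PySem.List.slice_toNat _ (by omega) (by omega), List.drop_drop,
            show (i + s).toNat = s.toNat + i.toNat from by omega,
            show (i + s + s).toNat - (s.toNat + i.toNat) = s.toNat + i.toNat - i.toNat from by omega]
      rw [htail, ih (digits.drop s.toNat).length (by simp only [List.length_drop]; omega) _ rfl]
      conv_rhs => rw [chunks]
      rw [dif_pos ⟨by omega, hle⟩]
      congr 1
      rw [show (0:Int) + s = s from zero_add s, PySem.List.slice_toNat _ le_rfl (by omega)]
      simp
    · rw [pyRange_pos_nil _ _ s hs (by omega), List.map_nil]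
      rw [chunks, dif_neg (by omega)]

-- ===== VERDICT (by name: the statement is the Claim_ definition above) =====
theorem layers_spec : Claim_equal_layers := by
  intro digits width height _
  unfold Spec_layers layers layers_alt
  by_cases hwh : width ≤ 0 ∨ height ≤ 0
  · rw [if_pos hwh, loopA_degenerate width height hwh digits 0 0 [] [] le_rfl le_rfl]
  · simp only [not_or, not_le] at hwh
    rw [if_neg (by omega)]
    rw [loopA_chunks width height (by omega) (by omega) digits.length digits rfl []]
    rw [alt_chunks (width * height) (by nlinarith) digits.length digits rfl]
    simp
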